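-- pv_equiv track=rewrite | github.com/reacho/dominance_order | main.py | compute_all_sum
-- ===== SOURCE A (Python) =====
-- def compute_all_sum(v_base, v_exp):
--     partial_sum = 0
--     v_sum = []
--     for base, exp in zip(v_base, v_exp):
--         v_sum_aus = []
--         for cont_1 in range(len(base)):
--             b = base[cont_1]
--             e = exp[cont_1]
--             for _ in range(e):
--                 partial_sum += b
--                 v_sum_aus.append(partial_sum)
--         v_sum.append(v_sum_aus)
--
--     return v_sum
-- ===== SOURCE B (Python) =====
-- def compute_all_sum(v_base, v_exp):
--     # Staged passes: flatten bases repeated by exponents, one global prefix-sum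
--     # pass, then cut the sums back into groups by recorded lengths.
--     flat = []
--     lengths = []
--     for base, exp in zip(v_base, v_exp):
--         start = len(flat)
--         for i in range(len(base)):
--             flat.extend([base[i]] * exp[i])
--         lengths.append(len(flat) - start)
--     sums = []
--     run = 0
--     for x in flat:
--         run += x
--         sums.append(run)
--     out = []
--     pos = 0
--     for n in lengths:
--         out.append(sums[pos:pos + n])
--         pos += n
--     return out
-- ===== Notes on version B (the rewrite author's own statement) =====
-- stated objective: alternative
-- what changed: B replaces A's single nested cumulative loop by three staged passes: flatten each base repeated by its exponent into one flat list (recording group lengths), take one global prefix-sum pass over the flat list, then slice the prefix sums back into groups.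
import Mathlib
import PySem

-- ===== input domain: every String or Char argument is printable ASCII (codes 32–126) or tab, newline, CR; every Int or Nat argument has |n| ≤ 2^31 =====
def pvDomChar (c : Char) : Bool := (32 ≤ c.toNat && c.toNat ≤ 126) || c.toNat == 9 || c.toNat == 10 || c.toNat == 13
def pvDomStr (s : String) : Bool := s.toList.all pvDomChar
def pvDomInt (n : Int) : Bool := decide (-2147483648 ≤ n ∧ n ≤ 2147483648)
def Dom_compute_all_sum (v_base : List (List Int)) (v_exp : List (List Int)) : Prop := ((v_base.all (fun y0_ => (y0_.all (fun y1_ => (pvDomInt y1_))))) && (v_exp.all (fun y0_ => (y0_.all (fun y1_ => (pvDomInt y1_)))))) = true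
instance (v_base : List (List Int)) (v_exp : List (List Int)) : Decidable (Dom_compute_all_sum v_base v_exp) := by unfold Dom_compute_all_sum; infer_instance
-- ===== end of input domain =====

-- B computes the same rows by three staged passes (flatten, one global prefix-sum pass, split
-- by lengths) instead of A's single nested cumulative loop; return values agree on Pre_.

-- ===== PORT A =====
-- inner 'for _ in range(e): partial_sum += b; v_sum_aus.append(partial_sum)'
def pvAInner (b : Int) (e : Int) (st : Int × List Int) : Int × List Int :=
  (PySem.List.pyRange 0 e 1).foldl (fun st _ => (st.1 + b, st.2 ++ [st.1 + b])) st

-- middle 'for cont_1 in range(len(base)): b = base[cont_1]; e = exp[cont_1]; …'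
def pvARow (base : List Int) (exp : List Int) (carry : Int) : Int × List Int :=
  (PySem.List.pyRange 0 (base.length : Int) 1).foldl
    (fun st c =>
      let b := PySem.List.pyGetD base c 0
      let e := PySem.List.pyGetD exp c 0
      pvAInner b e st) (carry, [])

def compute_all_sum (v_base : List (List Int)) (v_exp : List (List Int)) : List (List Int) :=
  ((v_base.zip v_exp).foldl
    (fun (st : Int × List (List Int)) p =>
      let r := pvARow p.1 p.2 st.1
      (r.1, st.2 ++ [r.2])) (0, [])).2

-- ===== PORT B =====
-- stage 1 inner loop: 'flat.extend([base[i]] * exp[i])'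
-- (Python '[b] * e' is empty for e ≤ 0 and has e copies otherwise: exactly List.replicate e.toNat b)
def pvBFlatGroup (base : List Int) (exp : List Int) (flat : List Int) : List Int :=
  (PySem.List.pyRange 0 (base.length : Int) 1).foldl
    (fun f i => f ++ List.replicate (PySem.List.pyGetD exp i 0).toNat (PySem.List.pyGetD base i 0))
    flat

-- stage 1: 'for base, exp in zip(...): start = len(flat); …; lengths.append(len(flat) - start)'
def pvBStage1 (v_base : List (List Int)) (v_exp : List (List Int)) : List Int × List Int :=
  (v_base.zip v_exp).foldl
    (fun (st : List Int × List Int) p =>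
      let flat' := pvBFlatGroup p.1 p.2 st.1
      (flat', st.2 ++ [(flat'.length : Int) - (st.1.length : Int)])) ([], [])

-- stage 2: 'run += x; sums.append(run)'
def pvBStage2 (flat : List Int) : List Int :=
  (flat.foldl (fun (st : Int × List Int) x => (st.1 + x, st.2 ++ [st.1 + x])) (0, [])).2

-- stage 3: 'for n in lengths: out.append(sums[pos:pos + n]); pos += n'
def pvBStage3 (sums : List Int) (lengths : List Int) : List (List Int) :=
  (lengths.foldl
    (fun (st : Int × List (List Int)) n =>
      (st.1 + n, st.2 ++ [PySem.List.slice sums (some st.1) (some (st.1 + n))])) (0, [])).2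

def compute_all_sum_alt (v_base : List (List Int)) (v_exp : List (List Int)) : List (List Int) :=
  let s1 := pvBStage1 v_base v_exp
  pvBStage3 (pvBStage2 s1.1) s1.2

-- ===== PRECONDITION & SPEC =====
-- Pre_ excludes inputs where, inside a zipped pair, exp is shorter than base: there Python A
-- (and B alike) raises IndexError on exp[i].
def Pre_compute_all_sum (v_base : List (List Int)) (v_exp : List (List Int)) : Prop :=
  ∀ p ∈ v_base.zip v_exp, p.1.length ≤ p.2.length
instance (v_base : List (List Int)) (v_exp : List (List Int)) : Decidable (Pre_compute_all_sum v_base v_exp) := by unfold Pre_compute_all_sum; infer_instance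

def pvWitness_compute_all_sum : List (List Int) × List (List Int) := ([[2, 3], [1]], [[1, 2], [3]])

def Spec_compute_all_sum (v_base : List (List Int)) (v_exp : List (List Int)) (out : List (List Int)) : Prop := out = compute_all_sum_alt v_base v_exp
instance (v_base : List (List Int)) (v_exp : List (List Int)) (out : List (List Int)) : Decidable (Spec_compute_all_sum v_base v_exp out) := by unfold Spec_compute_all_sum; infer_instance

-- ===== CLAIM (what is proved, stated in full; the proofs are below) =====
def Claim_equal_compute_all_sum : Prop := ∀ (v_base : List (List Int)) (v_exp : List (List Int)), Dom_compute_all_sum v_base v_exp → Pre_compute_all_sum v_base v_exp → Spec_compute_all_sum v_base v_exp (compute_all_sum v_base v_exp)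

-- ===== LEMMAS AND PROOFS =====

-- the flat repetition list of one group
def pvRep (base : List Int) (exp : List Int) : List Int :=
  (PySem.List.pyRange 0 (base.length : Int) 1).flatMap
    (fun i => List.replicate (PySem.List.pyGetD exp i 0).toNat (PySem.List.pyGetD base i 0))

-- running prefix sums starting from carry c
def pvScan (c : Int) : List Int → List Int
  | [] => []
  | x :: t => (c + x) :: pvScan (c + x) t

-- the common specification: per group, the scan of its repetition list, carry threaded through
def pvSpecGo (c : Int) : List (List Int × List Int) → List (List Int)
  | [] => []
  | p :: t => pvScan c (pvRep p.1 p.2) :: pvSpecGo (c + (pvRep p.1 p.2).sum) t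

lemma pvScan_length (c : Int) (xs : List Int) : (pvScan c xs).length = xs.length := by
  induction xs generalizing c with
  | nil => rfl
  | cons x t ih => simp [pvScan, ih]

lemma pvScan_append (c : Int) (xs ys : List Int) :
    pvScan c (xs ++ ys) = pvScan c xs ++ pvScan (c + xs.sum) ys := by
  induction xs generalizing c with
  | nil => simp [pvScan]
  | cons x t ih => simp [pvScan, ih, add_assoc]

-- the prefix-sum fold, characterised
lemma pvStep_foldl (xs : List Int) : ∀ (c : Int) (a : List Int),
    xs.foldl (fun (st : Int × List Int) x => (st.1 + x, st.2 ++ [st.1 + x])) (c, a)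
      = (c + xs.sum, a ++ pvScan c xs) := by
  induction xs with
  | nil => intro c a; simp [pvScan]
  | cons x t ih => intro c a; simp [List.foldl_cons, ih, pvScan, add_assoc]

-- A's innermost loop is the prefix-sum fold over 'replicate e.toNat b'
lemma pvAInner_eq_foldl (b e : Int) (st : Int × List Int) :
    pvAInner b e st
      = (List.replicate e.toNat b).foldl
          (fun (st : Int × List Int) x => (st.1 + x, st.2 ++ [st.1 + x])) st := by
  rw [pvAInner]
  have h : ∀ (l : List Int) (s : Int × List Int),
      l.foldl (fun st _ => (st.1 + b, st.2 ++ [st.1 + b])) s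
        = (List.replicate l.length b).foldl
            (fun (st : Int × List Int) x => (st.1 + x, st.2 ++ [st.1 + x])) s := by
    intro l
    induction l with
    | nil => intro s; rfl
    | cons x t ih => intro s; simp [List.foldl_cons, List.replicate_succ, ih]
  rw [h, PySem.List.length_pyRange_one]
  simp

-- A's middle loop is the prefix-sum fold over the group's repetition list
lemma pvARow_eq (base exp : List Int) (c : Int) :
    pvARow base exp c = (c + (pvRep base exp).sum, pvScan c (pvRep base exp)) := by
  rw [pvARow]
  show (PySem.List.pyRange 0 (base.length : Int) 1).foldl
      (fun st i => pvAInner (PySem.List.pyGetD base i 0) (PySem.List.pyGetD exp i 0) st)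
      (c, []) = _
  have hc := PySem.List.foldl_congr_mem
      (l := PySem.List.pyRange 0 (base.length : Int) 1)
      (f := fun st i => pvAInner (PySem.List.pyGetD base i 0) (PySem.List.pyGetD exp i 0) st)
      (g := fun st i =>
        (List.replicate (PySem.List.pyGetD exp i 0).toNat (PySem.List.pyGetD base i 0)).foldl
          (fun (st : Int × List Int) x => (st.1 + x, st.2 ++ [st.1 + x])) st)
      (init := (c, ([] : List Int)))
      (by intro acc x _; exact pvAInner_eq_foldl _ _ _)
  rw [hc]
  rw [← List.foldl_flatMap, pvStep_foldl]
  simp [pvRep]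

-- A's outer loop equals the specification
lemma pvA_go (L : List (List Int × List Int)) : ∀ (c : Int) (rows : List (List Int)),
    ((L.foldl (fun (st : Int × List (List Int)) p =>
        let r := pvARow p.1 p.2 st.1
        (r.1, st.2 ++ [r.2])) (c, rows)).2) = rows ++ pvSpecGo c L := by
  induction L with
  | nil => intro c rows; simp [pvSpecGo]
  | cons p t ih =>
      intro c rows
      simp only [List.foldl_cons]
      rw [show (let r := pvARow p.1 p.2 (c, rows).1; (r.1, (c, rows).2 ++ [r.2]))
            = (c + (pvRep p.1 p.2).sum, rows ++ [pvScan c (pvRep p.1 p.2)]) by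
        simp [pvARow_eq]]
      rw [ih]
      simp [pvSpecGo]

-- B's stage 1 builds the concatenated repetition list and the group lengths
lemma pvBFlatGroup_eq (base exp flat : List Int) :
    pvBFlatGroup base exp flat = flat ++ pvRep base exp := by
  rw [pvBFlatGroup, pvRep, PySem.List.foldl_append_eq_flatMap]

lemma pvBStage1_go (L : List (List Int × List Int)) : ∀ (flat : List Int) (lens : List Int),
    L.foldl (fun (st : List Int × List Int) p =>
        let flat' := pvBFlatGroup p.1 p.2 st.1
        (flat', st.2 ++ [(flat'.length : Int) - (st.1.length : Int)])) (flat, lens)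
      = (flat ++ L.flatMap (fun p => pvRep p.1 p.2),
         lens ++ L.map (fun p => ((pvRep p.1 p.2).length : Int))) := by
  induction L with
  | nil => intro flat lens; simp
  | cons p t ih =>
      intro flat lens
      simp only [List.foldl_cons]
      rw [show (let flat' := pvBFlatGroup p.1 p.2 (flat, lens).1;
              (flat', (flat, lens).2 ++ [(flat'.length : Int) - ((flat, lens).1.length : Int)]))
            = (flat ++ pvRep p.1 p.2, lens ++ [((pvRep p.1 p.2).length : Int)]) by
        simp only [pvBFlatGroup_eq, List.length_append, Prod.mk.injEq]
        refine ⟨trivial, ?_⟩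
        push_cast
        simp]
      rw [ih]
      simp

-- B's stage 3, splitting the global prefix sums back into the per-group scans
lemma pvBStage3_go (S : List Int) (L : List (List Int × List Int)) :
    ∀ (p0 : Nat) (c : Int) (out : List (List Int)),
    S.drop p0 = pvScan c (L.flatMap (fun p => pvRep p.1 p.2)) →
    ((L.map (fun p => ((pvRep p.1 p.2).length : Int))).foldl
        (fun (st : Int × List (List Int)) n =>
          (st.1 + n, st.2 ++ [PySem.List.slice S (some st.1) (some (st.1 + n))]))
        ((p0 : Int), out)).2
      = out ++ pvSpecGo c L := by
  induction L with
  | nil => intro p0 c out _; simp [pvSpecGo]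
  | cons p t ih =>
      intro p0 c out h
      simp only [List.flatMap_cons, pvScan_append] at h
      simp only [List.map_cons, List.foldl_cons]
      rw [PySem.List.slice_natCast_add, h,
          List.take_left' (pvScan_length c (pvRep p.1 p.2))]
      rw [show ((p0 : Int) + ((pvRep p.1 p.2).length : Int))
            = ((p0 + (pvRep p.1 p.2).length : Nat) : Int) by push_cast; ring]
      rw [ih (p0 + (pvRep p.1 p.2).length) (c + (pvRep p.1 p.2).sum)
            (out ++ [pvScan c (pvRep p.1 p.2)])
            (by rw [← List.drop_drop, h,
                    show (pvRep p.1 p.2).length = (pvScan c (pvRep p.1 p.2)).length from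
                      (pvScan_length c (pvRep p.1 p.2)).symm,
                    List.drop_left])]
      simp [pvSpecGo]

lemma pvB_eq_spec (v_base v_exp : List (List Int)) :
    compute_all_sum_alt v_base v_exp = pvSpecGo 0 (v_base.zip v_exp) := by
  rw [compute_all_sum_alt]
  rw [show pvBStage1 v_base v_exp
        = ((v_base.zip v_exp).flatMap (fun p => pvRep p.1 p.2),
           (v_base.zip v_exp).map (fun p => ((pvRep p.1 p.2).length : Int))) by
    rw [pvBStage1, pvBStage1_go]; simp]
  rw [show pvBStage2 ((v_base.zip v_exp).flatMap (fun p => pvRep p.1 p.2))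
        = pvScan 0 ((v_base.zip v_exp).flatMap (fun p => pvRep p.1 p.2)) by
    rw [pvBStage2, pvStep_foldl]; simp]
  rw [pvBStage3]
  have := pvBStage3_go (pvScan 0 ((v_base.zip v_exp).flatMap (fun p => pvRep p.1 p.2)))
      (v_base.zip v_exp) 0 0 [] (by simp)
  simpa using this

-- ===== VERDICT (by name: the statement is the Claim_ definition above) =====
theorem compute_all_sum_spec : Claim_equal_compute_all_sum := by
  intro v_base v_exp _ _
  unfold Spec_compute_all_sum
  rw [pvB_eq_spec, compute_all_sum, pvA_go]
  simp
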